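-- pv_equiv track=rewrite | github.com/blakebiz/StockTraderV1.1 | stockSelecPopUp.py | formatStocks
-- ===== SOURCE A (Python) =====
-- def formatStocks(stocks):
--     from copy import deepcopy
--     sCopy = sorted(deepcopy(stocks))
--     stoinks = []
--     n = 0
--     while len(sCopy) > 0:
--         i = 0
--         while i < 5:
--             if len(sCopy) <= 0:
--                 break
--             elif i == 0:
--                 stoinks.append([sCopy.pop()])
--             else:
--                 stoinks[n].append(sCopy.pop())
--             i += 1
--         n += 1
--     return stoinks
-- ===== SOURCE B (Python) =====
-- def formatStocks(stocks):
--     s = sorted(stocks, reverse=True)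
--     return [s[i:i+5] for i in range(0, len(s), 5)]
-- ===== Notes on version B (the rewrite author's own statement) =====
-- stated objective: simpler
-- what changed: Replaces the destructive pop-from-the-end double while-loop with manual n/i counters (and a needless deepcopy) by one reverse sort followed by an index-sliced chunking comprehension.
import Mathlib
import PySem

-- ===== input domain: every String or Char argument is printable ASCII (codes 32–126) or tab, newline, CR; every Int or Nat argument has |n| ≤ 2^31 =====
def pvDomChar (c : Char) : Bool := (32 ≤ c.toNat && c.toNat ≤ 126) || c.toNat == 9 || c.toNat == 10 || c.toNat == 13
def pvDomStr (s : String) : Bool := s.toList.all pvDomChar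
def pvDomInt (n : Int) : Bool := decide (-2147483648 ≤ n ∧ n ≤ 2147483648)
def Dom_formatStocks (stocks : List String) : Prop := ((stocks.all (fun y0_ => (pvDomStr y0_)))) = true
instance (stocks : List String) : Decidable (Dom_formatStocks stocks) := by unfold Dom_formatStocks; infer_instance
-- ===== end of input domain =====

-- B replaces A's destructive pop-from-the-end double loop (and needless deepcopy) by one
-- reverse sort plus index-sliced chunks of five: simpler, same result.

-- ===== PORT A =====
-- inner 'while i < 5' loop of A: pops from the end of sCopy, appending into stoinks[n];
-- the loop runs at most 5 - i more times, which is the structural fuel of fsInnerGo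
def fsInnerGo : Nat → List String → List (List String) → Nat → Nat →
    List String × List (List String)
  | 0, sCopy, stoinks, _, _ => (sCopy, stoinks)          -- i < 5 failed: loop exits
  | k + 1, sCopy, stoinks, n, i =>
    if sCopy.length ≤ 0 then (sCopy, stoinks)            -- break
    else if i = 0 then
      fsInnerGo k sCopy.dropLast (stoinks ++ [[sCopy.getLastD ""]]) n (i + 1)
    else
      fsInnerGo k sCopy.dropLast (stoinks.modify n (fun g => g ++ [sCopy.getLastD ""])) n (i + 1)

def fsInner (sCopy : List String) (stoinks : List (List String)) (n i : Nat) :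
    List String × List (List String) :=
  fsInnerGo (5 - i) sCopy stoinks n i

-- outer 'while len(sCopy) > 0' loop; each iteration pops at least one element, so the
-- initial length of sCopy is sufficient structural fuel
def fsOuterGo : Nat → List String → List (List String) → Nat → List (List String)
  | 0, _, stoinks, _ => stoinks
  | f + 1, sCopy, stoinks, n =>
    if 0 < sCopy.length then
      let r := fsInner sCopy stoinks n 0
      fsOuterGo f r.1 r.2 (n + 1)
    else stoinks

-- A: sorted(deepcopy(stocks)) then the two while-loops (deepcopy of immutable strings is identity)
def formatStocks (stocks : List String) : List (List String) :=
  let sCopy := PySem.List.sorted stocks (fun x => x) false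
  fsOuterGo sCopy.length sCopy [] 0

-- ===== PORT B =====
def formatStocks_alt (stocks : List String) : List (List String) :=
  let s := PySem.List.sorted stocks (fun x => x) true
  (PySem.List.pyRange 0 (s.length : Int) 5).map
    (fun i => PySem.List.slice s (some i) (some (i + 5)))

-- ===== PRECONDITION & SPEC =====
def Spec_formatStocks (stocks : List String) (out : List (List String)) : Prop := out = formatStocks_alt stocks
instance (stocks : List String) (out : List (List String)) : Decidable (Spec_formatStocks stocks out) := by unfold Spec_formatStocks; infer_instance

-- ===== CLAIM (what is proved, stated in full; the proofs are below) =====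
def Claim_equal_formatStocks : Prop := ∀ (stocks : List String), Dom_formatStocks stocks → Spec_formatStocks stocks (formatStocks stocks)

-- ===== LEMMAS AND PROOFS =====

-- reference chunking: groups of five, front to back
def chunks (l : List String) : List (List String) :=
  if l = [] then [] else l.take 5 :: chunks (l.drop 5)
termination_by l.length
decreasing_by
  have : l.length ≠ 0 := by simpa [List.length_eq_zero_iff] using ‹l ≠ []›
  simp; omega

theorem modify_append_singleton (st' : List (List String)) (g : List String)
    (f : List String → List String) :
    (st' ++ [g]).modify st'.length f = st' ++ [f g] := by
  induction st' with
  | nil => simp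
  | cons a t ih => simpa using ih

theorem fsInnerGo_succ (k : Nat) :
    ∀ (s : List String) (st' : List (List String)) (g : List String) (i : Nat), 1 ≤ i →
      fsInnerGo k s (st' ++ [g]) st'.length i =
        ((s.reverse.drop k).reverse, st' ++ [g ++ s.reverse.take k]) := by
  induction k with
  | zero => intro s st' g i _; simp [fsInnerGo]
  | succ k ih =>
    intro s st' g i hi
    rcases hr : s.reverse with _ | ⟨a, t⟩
    · have hs : s = [] := by simpa using congrArg List.reverse hr
      subst hs
      simp [fsInnerGo]
    · have hs : s = t.reverse ++ [a] := by
        have := congrArg List.reverse hr; simpa using this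
      subst hs
      have hlen : ¬ (t.reverse ++ [a]).length ≤ 0 := by simp
      have hne0 : i ≠ 0 := by omega
      show (if (t.reverse ++ [a]).length ≤ 0 then (t.reverse ++ [a], st' ++ [g])
        else if i = 0 then _ else _) = _
      rw [if_neg hlen, if_neg hne0]
      rw [List.dropLast_concat, List.getLastD_concat, modify_append_singleton]
      rw [ih t.reverse st' (g ++ [a]) (i + 1) (by omega)]
      simp [List.take_succ_cons, List.drop_succ_cons]

theorem fsInner_zero (s : List String) (st : List (List String)) (hs : s ≠ []) :
    fsInner s st st.length 0 =
      ((s.reverse.drop 5).reverse, st ++ [s.reverse.take 5]) := by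
  rcases hr : s.reverse with _ | ⟨a, t⟩
  · exact absurd (by simpa using congrArg List.reverse hr) hs
  · have hseq : s = t.reverse ++ [a] := by
      have := congrArg List.reverse hr; simpa using this
    have hlen : ¬ s.length ≤ 0 := by
      simp [List.length_eq_zero_iff, hs]
    unfold fsInner
    show (if s.length ≤ 0 then (s, st) else if (0:Nat) = 0 then _ else _) = _
    rw [if_neg hlen, if_pos rfl]
    have hdl : s.dropLast = t.reverse := by rw [hseq]; exact List.dropLast_concat
    have hgl : s.getLastD "" = a := by rw [hseq]; exact List.getLastD_concat ..
    rw [hdl, hgl]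
    rw [fsInnerGo_succ 4 t.reverse st [a] 1 (by omega)]
    simp

theorem chunks_nil : chunks [] = [] := by rw [chunks]; simp

theorem chunks_cons (l : List String) (h : l ≠ []) :
    chunks l = l.take 5 :: chunks (l.drop 5) := by
  rw [chunks]; simp [h]

theorem fsOuterGo_spec :
    ∀ (f : Nat) (s : List String), s.length ≤ f →
      ∀ (st : List (List String)), fsOuterGo f s st st.length = st ++ chunks s.reverse := by
  intro f
  induction f with
  | zero =>
    intro s hlen st
    have hs : s = [] := by
      cases s with
      | nil => rfl
      | cons a t => simp at hlen
    subst hs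
    simp [fsOuterGo, chunks_nil]
  | succ f ih =>
    intro s hlen st
    by_cases hs : s = []
    · subst hs; simp [fsOuterGo, chunks_nil]
    · have hpos : 0 < s.length := by
        simpa [List.length_pos_iff] using hs
      show (if 0 < s.length then
          fsOuterGo f (fsInner s st st.length 0).1 (fsInner s st st.length 0).2
            (st.length + 1)
        else st) = st ++ chunks s.reverse
      rw [if_pos hpos]
      rw [fsInner_zero s st hs]
      have hst : st.length + 1 = (st ++ [s.reverse.take 5]).length := by simp
      simp only [hst]
      rw [ih ((s.reverse.drop 5).reverse) (by simp; omega) (st ++ [s.reverse.take 5])]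
      rw [List.reverse_reverse]
      rw [chunks_cons s.reverse (by simpa using hs)]
      simp

theorem sorted_rev_eq_reverse (xs : List String) :
    PySem.List.sorted xs (fun x => x) true =
      (PySem.List.sorted xs (fun x => x) false).reverse := by
  apply List.Perm.eq_of_pairwise (le := fun a b : String => b ≤ a)
  · exact fun a b _ _ h1 h2 => le_antisymm h2 h1
  · exact PySem.List.sorted_pairwise_rev xs _
  · exact List.pairwise_reverse.mpr (PySem.List.sorted_pairwise xs _)
  · exact (PySem.List.sorted_perm xs _ true).trans
      ((PySem.List.sorted_perm xs _ false).symm.trans (List.reverse_perm _).symm)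

theorem pyRange5_cons (b : Int) (hb : 0 < b) :
    PySem.List.pyRange 0 b 5 =
      0 :: (PySem.List.pyRange 0 (b - 5) 5).map (· + 5) := by
  rw [PySem.List.pyRange_of_pos 0 b (by norm_num),
      PySem.List.pyRange_of_pos 0 (b - 5) (by norm_num)]
  by_cases h5 : 5 < b
  · have hif1 : (if (0:Int) < b then ((b - 0 + 5 - 1) / 5).toNat else 0) =
        ((b + 4) / 5).toNat := by rw [if_pos hb]; ring_nf
    have hif2 : (if (0:Int) < b - 5 then ((b - 5 - 0 + 5 - 1) / 5).toNat else 0) =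
        ((b - 1) / 5).toNat := by rw [if_pos (by omega)]; ring_nf
    rw [hif1, hif2]
    have hcnt : ((b + 4) / 5).toNat = ((b - 1) / 5).toNat + 1 := by omega
    rw [hcnt, List.range_succ_eq_map]
    simp [List.map_map, Function.comp_def, mul_add]
  · have hb5 : b ≤ 5 := by omega
    have hif1 : (if (0:Int) < b then ((b - 0 + 5 - 1) / 5).toNat else 0) = 1 := by
      rw [if_pos hb]; omega
    have hif2 : (if (0:Int) < b - 5 then ((b - 5 - 0 + 5 - 1) / 5).toNat else 0) = 0 := by
      rw [if_neg (by omega)]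
    rw [hif1, hif2]
    simp

theorem chunkMap :
    ∀ (k : Nat) (l : List String), l.length ≤ k →
      (PySem.List.pyRange 0 (l.length : Int) 5).map
        (fun i => PySem.List.slice l (some i) (some (i + 5))) = chunks l := by
  intro k
  induction k with
  | zero =>
    intro l hlen
    have : l = [] := by
      cases l with
      | nil => rfl
      | cons a t => simp at hlen
    subst this
    simp [PySem.List.pyRange_of_pos 0 0 (by norm_num : (0:Int) < 5), chunks_nil]
  | succ k ih =>
    intro l hlen
    by_cases hl : l = []
    · subst hl
      simp [PySem.List.pyRange_of_pos 0 0 (by norm_num : (0:Int) < 5), chunks_nil]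
    · have hpos : 0 < l.length := List.length_pos_iff.mpr hl
      rw [pyRange5_cons (l.length : Int) (by exact_mod_cast hpos)]
      rw [List.map_cons, List.map_map]
      have hhead : PySem.List.slice l (some 0) (some (0 + 5)) = l.take 5 := by
        rw [(by norm_num : (0:Int) + 5 = 5)]
        rw [PySem.List.slice_toNat l (by norm_num) (by norm_num)]
        simp
      rw [hhead]
      have hrng : ((l.length : Int) - 5) = (((l.drop 5).length : Nat) : Int) ∨
          ((l.length : Int) - 5 ≤ 0 ∧ ((l.drop 5).length : Int) ≤ 0) := by
        by_cases h5 : 5 ≤ l.length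
        · left; simp; omega
        · right; constructor <;> simp <;> omega
      have htail :
          (PySem.List.pyRange 0 ((l.length : Int) - 5) 5).map
            ((fun i => PySem.List.slice l (some i) (some (i + 5))) ∘ (· + 5)) =
          (PySem.List.pyRange 0 (((l.drop 5).length : Nat) : Int) 5).map
            (fun i => PySem.List.slice (l.drop 5) (some i) (some (i + 5))) := by
        have hreq : PySem.List.pyRange 0 ((l.length : Int) - 5) 5 =
            PySem.List.pyRange 0 (((l.drop 5).length : Nat) : Int) 5 := by
          rcases hrng with h | ⟨h1, h2⟩
          · rw [h]
          · rw [PySem.List.pyRange_of_pos 0 _ (by norm_num : (0:Int) < 5),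
                PySem.List.pyRange_of_pos 0 _ (by norm_num : (0:Int) < 5)]
            rw [if_neg (by omega), if_neg (by omega)]
        rw [hreq]
        apply List.map_congr_left
        intro i hi
        have hi0 : 0 ≤ i := by
          have := ((PySem.List.mem_pyRange_iff_of_pos (by norm_num : (0:Int) < 5) i).mp hi).1
          omega
        simp only [Function.comp]
        rw [PySem.List.slice_toNat l (by omega) (by omega),
            PySem.List.slice_toNat (l.drop 5) (by omega) (by omega)]
        have e1 : (i + 5 + 5).toNat - (i + 5).toNat = 5 := by omega
        have e2 : (i + 5).toNat - i.toNat = 5 := by omega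
        have e3 : (i + 5).toNat = 5 + i.toNat := by omega
        rw [e1, e2, e3, List.drop_drop]
      rw [htail, ih (l.drop 5) (by simp; omega)]
      rw [chunks_cons l hl]

-- ===== VERDICT (by name: the statement is the Claim_ definition above) =====
theorem formatStocks_spec : Claim_equal_formatStocks := by
  intro stocks _
  unfold Spec_formatStocks formatStocks formatStocks_alt
  have h0 : (0:Nat) = ([] : List (List String)).length := rfl
  rw [h0, fsOuterGo_spec (PySem.List.sorted stocks (fun x => x) false).length _ le_rfl []]
  rw [← sorted_rev_eq_reverse]
  rw [chunkMap (PySem.List.sorted stocks (fun x => x) true).length _ le_rfl]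
  simp
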